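-- pv_equiv track=rewrite | github.com/pedrofariacomposer/comptools | build/lib/comptools/basic_tools.py | most_compact
-- ===== SOURCE A (Python) =====
-- from typing import Dict, Sequence, List
--
-- def most_compact(
--     a: Sequence,
--     b: Sequence,
-- ) -> Sequence:
--
--     """ Compares two lists and returns the one that is more compact, as defined by Forte and Straus.
--     Function written by Raphael Santos.
--     """
--
--     for i in range(len(a) - 1, 0, -1):
--         a_diff = (a[i] - a[0]) % 12
--         b_diff = (b[i] - b[0]) % 12
--         if a_diff < b_diff:
--             return a
--         elif a_diff > b_diff:
--             return b
--     if a[0] < b[0]: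
--         return a
--     else:
--         return b
-- ===== SOURCE B (Python) =====
-- def most_compact(a, b):
--     """More compact of two pitch sets (Forte/Straus): encode each set's mod-12
--     interval profile (highest index first) as a single base-12 integer and
--     compare the two integers; tie-break on the first elements."""
--     va = 0
--     vb = 0
--     for i in range(len(a) - 1, 0, -1):
--         va = va * 12 + (a[i] - a[0]) % 12
--         vb = vb * 12 + (b[i] - b[0]) % 12
--     if va < vb:
--         return a
--     if vb < va:
--         return b
--     return a if a[0] < b[0] else b
-- ===== Notes on version B (the rewrite author's own statement) =====
-- stated objective: alternative
-- what changed: Replaces A's early-exit element-by-element lexicographic comparison with a base-12 arithmetic encoding: each set's whole mod-12 interval profile is folded into one integer (digits are in [0,12), so base-12 order equals lexicographic order) and a single integer comparison plus a first-element tie-break decides the winner.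
import Mathlib
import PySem

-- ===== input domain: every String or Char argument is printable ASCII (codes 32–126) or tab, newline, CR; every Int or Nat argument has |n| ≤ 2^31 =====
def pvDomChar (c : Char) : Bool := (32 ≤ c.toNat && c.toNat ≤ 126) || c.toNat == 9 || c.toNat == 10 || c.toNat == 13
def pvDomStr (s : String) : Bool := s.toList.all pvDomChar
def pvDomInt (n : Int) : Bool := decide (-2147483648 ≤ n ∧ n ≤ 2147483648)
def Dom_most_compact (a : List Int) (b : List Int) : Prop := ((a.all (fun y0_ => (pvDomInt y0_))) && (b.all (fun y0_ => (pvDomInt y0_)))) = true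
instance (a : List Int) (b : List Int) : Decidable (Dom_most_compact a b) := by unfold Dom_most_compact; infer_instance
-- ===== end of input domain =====

-- B replaces A's early-exit lexicographic loop by folding each set's mod-12 interval
-- profile into one base-12 integer and comparing the two integers (alternative, not faster:
-- the encoded integer grows with the list, so B costs more on very long lists).


-- ===== PORT A =====
-- (x[i] - x[0]) % 12: the intermediate value both Pythons compute.
def diff12 (xs : List Int) (i : Int) : Int :=
  PySem.Int.mod (PySem.List.pyGetD xs i 0 - PySem.List.pyGetD xs 0 0) 12

-- A's for-loop over range(len(a)-1, 0, -1) with early returns, as structural recursion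
-- over the range list; indexing via pyGetD (Pre_ guarantees every access is in range).
def mcLoopA (a : List Int) (b : List Int) : List Int → List Int
  | [] => if PySem.List.pyGetD a 0 0 < PySem.List.pyGetD b 0 0 then a else b
  | i :: rest =>
      let aDiff := diff12 a i
      let bDiff := diff12 b i
      if aDiff < bDiff then a
      else if aDiff > bDiff then b
      else mcLoopA a b rest

def most_compact (a : List Int) (b : List Int) : List Int :=
  mcLoopA a b (PySem.List.pyRange ((a.length : Int) - 1) 0 (-1))

-- ===== PORT B =====
-- Source B's single loop: fold the index range into the pair (va, vb) of base-12 encodings.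
def most_compact_alt (a : List Int) (b : List Int) : List Int :=
  let p := (PySem.List.pyRange ((a.length : Int) - 1) 0 (-1)).foldl
      (fun (v : Int × Int) i => (v.1 * 12 + diff12 a i, v.2 * 12 + diff12 b i)) (0, 0)
  if p.1 < p.2 then a
  else if p.2 < p.1 then b
  else if PySem.List.pyGetD a 0 0 < PySem.List.pyGetD b 0 0 then a else b

-- ===== PRECONDITION & SPEC =====
-- Pre_ is exactly where the Python A returns: both lists non-empty (a[0]/b[0]), and
-- b long enough for every index the loop reads (no index is read when len(a) = 1).
def Pre_most_compact (a : List Int) (b : List Int) : Prop :=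
  a ≠ [] ∧ b ≠ [] ∧ (a.length ≤ b.length ∨ a.length = 1)
instance (a : List Int) (b : List Int) : Decidable (Pre_most_compact a b) := by
  unfold Pre_most_compact; infer_instance

def pvWitness_most_compact : List Int × List Int := ([0, 2, 7], [0, 3, 7])

def Spec_most_compact (a : List Int) (b : List Int) (out : List Int) : Prop := out = most_compact_alt a b
instance (a : List Int) (b : List Int) (out : List Int) : Decidable (Spec_most_compact a b out) := by unfold Spec_most_compact; infer_instance

-- ===== CLAIM (what is proved, stated in full; the proofs are below) =====
def Claim_equal_most_compact : Prop := ∀ (a : List Int) (b : List Int), Dom_most_compact a b → Pre_most_compact a b → Spec_most_compact a b (most_compact a b)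

-- ===== LEMMAS AND PROOFS =====

-- the base-12 encoding of xs's diffs along the index list, from accumulator v
def encF (xs : List Int) : List Int → Int → Int
  | [], v => v
  | i :: rest, v => encF xs rest (v * 12 + diff12 xs i)

theorem diff12_nonneg (xs : List Int) (i : Int) : 0 ≤ diff12 xs i :=
  PySem.Int.mod_nonneg _ (by norm_num)

theorem diff12_lt (xs : List Int) (i : Int) : diff12 xs i < 12 :=
  PySem.Int.mod_lt _ (by norm_num)

-- encF is affine in its accumulator
theorem encF_affine (xs : List Int) : ∀ (is : List Int) (v : Int),
    encF xs is v = v * 12 ^ is.length + encF xs is 0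
  | [], v => by simp [encF]
  | i :: rest, v => by
    simp only [encF, List.length_cons]
    rw [encF_affine xs rest (v * 12 + diff12 xs i), encF_affine xs rest (0 * 12 + diff12 xs i)]
    ring

-- encF from 0 is a base-12 numeral: bounded by 12^length
theorem encF_bounds (xs : List Int) : ∀ (is : List Int),
    0 ≤ encF xs is 0 ∧ encF xs is 0 < 12 ^ is.length
  | [] => by simp [encF]
  | i :: rest => by
    have hb := encF_bounds xs rest
    have hd0 := diff12_nonneg xs i
    have hd1 := diff12_lt xs i
    simp only [encF, List.length_cons]
    rw [encF_affine xs rest (0 * 12 + diff12 xs i)]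
    constructor
    · nlinarith [pow_pos (by norm_num : (0:Int) < 12) rest.length]
    · have : (12:Int) ^ (rest.length + 1) = 12 ^ rest.length * 12 := by ring
      nlinarith [pow_pos (by norm_num : (0:Int) < 12) rest.length]

-- A's early-exit loop equals the comparison of the two base-12 encodings
theorem mcLoopA_eq_enc (a b : List Int) : ∀ (is : List Int),
    mcLoopA a b is =
      (if encF a is 0 < encF b is 0 then a
       else if encF b is 0 < encF a is 0 then b
       else if PySem.List.pyGetD a 0 0 < PySem.List.pyGetD b 0 0 then a else b)
  | [] => by simp [mcLoopA, encF]
  | i :: rest => by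
    have ih := mcLoopA_eq_enc a b rest
    have ⟨ha0, ha1⟩ := encF_bounds a rest
    have ⟨hb0, hb1⟩ := encF_bounds b rest
    have hP : (0:Int) < 12 ^ rest.length := pow_pos (by norm_num) rest.length
    have hda0 := diff12_nonneg a i; have hda1 := diff12_lt a i
    have hdb0 := diff12_nonneg b i; have hdb1 := diff12_lt b i
    have hEa : encF a (i :: rest) 0 = diff12 a i * 12 ^ rest.length + encF a rest 0 := by
      show encF a rest (0 * 12 + diff12 a i) = _
      rw [encF_affine]; ring
    have hEb : encF b (i :: rest) 0 = diff12 b i * 12 ^ rest.length + encF b rest 0 := by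
      show encF b rest (0 * 12 + diff12 b i) = _
      rw [encF_affine]; ring
    simp only [mcLoopA, hEa, hEb]
    rcases lt_trichotomy (diff12 a i) (diff12 b i) with h | h | h
    · have hlt : diff12 a i * 12 ^ rest.length + encF a rest 0 <
          diff12 b i * 12 ^ rest.length + encF b rest 0 := by nlinarith
      simp [h, hlt]
    · simp [h, add_lt_add_iff_left, ih]
    · have hlt : diff12 b i * 12 ^ rest.length + encF b rest 0 <
          diff12 a i * 12 ^ rest.length + encF a rest 0 := by nlinarith
      have hno : ¬ diff12 a i * 12 ^ rest.length + encF a rest 0 <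
          diff12 b i * 12 ^ rest.length + encF b rest 0 := by omega
      simp [show ¬ diff12 a i < diff12 b i by omega, h, hlt, hno]

-- B's paired fold is encF on each side
theorem foldl_pair_enc (a b : List Int) : ∀ (is : List Int) (va vb : Int),
    is.foldl (fun (v : Int × Int) i => (v.1 * 12 + diff12 a i, v.2 * 12 + diff12 b i)) (va, vb)
      = (encF a is va, encF b is vb)
  | [], va, vb => by simp [encF]
  | i :: rest, va, vb => by
    simp only [List.foldl_cons, encF]
    exact foldl_pair_enc a b rest _ _

-- ===== VERDICT (by name: the statement is the Claim_ definition above) =====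
theorem most_compact_spec : Claim_equal_most_compact := by
  intro a b _ _
  unfold Spec_most_compact most_compact most_compact_alt
  rw [foldl_pair_enc]
  exact mcLoopA_eq_enc a b _
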